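-- pv_equiv track=rewrite | github.com/rubelw/OSSS | src/OSSS/ai/agents/query_data/handlers/family_portal_access_handler.py | _select_family_portal_access_fields
-- ===== SOURCE A (Python) =====
-- from typing import Any, Dict, List, Sequence
--
-- def _select_family_portal_access_fields(
--     rows: Sequence[Dict[str, Any]],
-- ) -> List[str]:
--     if not rows:
--         return []
--
--     preferred_order = [
--         "id",
--         "contact_id",
--         "contact_name",
--         "contact_email",
--         "student_id",
--         "student_number",
--         "student_name",
--         "portal_username",
--         "access_level",      # viewer, editor, guardian, etc.
--         "status",            # invited, active, suspended, revoked
--         "invite_sent_at",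
--         "invite_accepted_at",
--         "last_login_at",
--         "is_active",
--         "notes",
--         "created_at",
--         "updated_at",
--     ]
--
--     all_keys: List[str] = []
--     for r in rows:
--         for k in r.keys():
--             if k not in all_keys:
--                 all_keys.append(k)
--
--     ordered = [k for k in preferred_order if k in all_keys]
--     ordered.extend(k for k in all_keys if k not in ordered)
--     return ordered
-- ===== SOURCE B (Python) =====
-- from typing import Any, Dict, List, Sequence
--
-- _PREFERRED_ORDER = [
--     "id",
--     "contact_id",
--     "contact_name",
--     "contact_email",
--     "student_id",
--     "student_number",
--     "student_name",
--     "portal_username",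
--     "access_level",
--     "status",
--     "invite_sent_at",
--     "invite_accepted_at",
--     "last_login_at",
--     "is_active",
--     "notes",
--     "created_at",
--     "updated_at",
-- ]
--
--
-- def _select_family_portal_access_fields(
--     rows: Sequence[Dict[str, Any]],
-- ) -> List[str]:
--     if not rows:
--         return []
--
--     rank = {k: i for i, k in enumerate(_PREFERRED_ORDER)}
--     hit = [False] * len(_PREFERRED_ORDER)
--     extras: List[str] = []
--     extra_seen = set()
--     for r in rows:
--         for k in r.keys():
--             i = rank.get(k)
--             if i is not None:
--                 hit[i] = True
--             elif k not in extra_seen: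
--                 extra_seen.add(k)
--                 extras.append(k)
--     return [k for k, h in zip(_PREFERRED_ORDER, hit) if h] + extras
-- ===== Notes on version B (the rewrite author's own statement) =====
-- stated objective: faster
-- what changed: A builds a dedup key list with a quadratic list-membership scan and then makes two filter passes (preferred-then-extras); B makes one pass that marks preferred keys in a fixed boolean presence table indexed by a rank dict and collects non-preferred keys in first-seen order via a set, then reads the table off in preferred order and appends the extras (no dedup list, no second filter pass).
import Mathlib
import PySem

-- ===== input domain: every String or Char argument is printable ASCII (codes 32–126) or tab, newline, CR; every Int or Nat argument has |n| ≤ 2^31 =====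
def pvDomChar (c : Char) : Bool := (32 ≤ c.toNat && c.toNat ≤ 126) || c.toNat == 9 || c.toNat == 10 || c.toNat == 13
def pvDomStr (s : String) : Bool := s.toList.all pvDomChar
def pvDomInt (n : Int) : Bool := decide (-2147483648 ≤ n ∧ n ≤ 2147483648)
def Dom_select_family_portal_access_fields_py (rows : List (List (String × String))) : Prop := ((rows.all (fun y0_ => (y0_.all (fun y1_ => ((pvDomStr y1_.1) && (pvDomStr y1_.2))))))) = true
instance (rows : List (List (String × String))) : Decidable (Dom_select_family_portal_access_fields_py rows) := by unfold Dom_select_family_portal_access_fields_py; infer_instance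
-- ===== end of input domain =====

-- B replaces A's quadratically built dedup key list and two filter passes by one pass that marks
-- preferred keys in a fixed boolean presence table (via a rank dict) and collects non-preferred
-- keys in first-seen order via a set (objective: faster — removes A's repeated list-membership scans).

-- the preferred-order constant both Pythons contain verbatim (shared data, not shared code)
def pvPreferred : List String :=
  ["id", "contact_id", "contact_name", "contact_email", "student_id", "student_number",
   "student_name", "portal_username", "access_level", "status", "invite_sent_at",
   "invite_accepted_at", "last_login_at", "is_active", "notes", "created_at", "updated_at"]

-- ===== PORT A =====
def select_family_portal_access_fields_py (rows : List (List (String × String))) : List String :=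
  if rows = [] then []
  else
    let preferred_order := pvPreferred
    let all_keys : List String :=
      rows.foldl (fun acc r =>
        r.foldl (fun acc2 kv => if kv.1 ∈ acc2 then acc2 else acc2 ++ [kv.1]) acc) []
    let ordered := preferred_order.filter (fun k => decide (k ∈ all_keys))
    -- ordered.extend(k for k in all_keys if k not in ordered): the generator tests the growing list
    all_keys.foldl (fun acc k => if k ∈ acc then acc else acc ++ [k]) ordered

-- ===== PORT B =====
def select_family_portal_access_fields_py_alt (rows : List (List (String × String))) : List String :=
  if rows = [] then []
  else
    let rank : PySem.Dict String Int :=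
      (PySem.List.enumerate pvPreferred 0).foldl (fun d p => d.insert p.2 p.1) PySem.Dict.empty
    -- state: (hit : List Bool, extra_seen : PySem.Set String, extras : List String)
    let st :=
      rows.foldl (fun st r =>
        r.foldl (fun st kv =>
          match rank.get? kv.1 with
          -- hit[i] = True: i comes from rank, so 0 ≤ i < len(hit); List.set is exact here
          | some i => (st.1.set i.toNat true, st.2.1, st.2.2)
          | none =>
            if PySem.Set.contains st.2.1 kv.1 then st
            else (st.1, PySem.Set.add st.2.1 kv.1, st.2.2 ++ [kv.1])) st)
        (List.replicate (PySem.List.len pvPreferred).toNat false,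
         (PySem.Set.empty : PySem.Set String), ([] : List String))
    ((pvPreferred.zip st.1).filter (·.2)).map (·.1) ++ st.2.2

-- ===== PRECONDITION & SPEC =====
def Spec_select_family_portal_access_fields_py (rows : List (List (String × String))) (out : List String) : Prop := out = select_family_portal_access_fields_py_alt rows
instance (rows : List (List (String × String))) (out : List String) : Decidable (Spec_select_family_portal_access_fields_py rows out) := by unfold Spec_select_family_portal_access_fields_py; infer_instance

-- ===== CLAIM (what is proved, stated in full; the proofs are below) =====
def Claim_equal_select_family_portal_access_fields_py : Prop := ∀ (rows : List (List (String × String))), Dom_select_family_portal_access_fields_py rows → Spec_select_family_portal_access_fields_py rows (select_family_portal_access_fields_py rows)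

-- ===== LEMMAS AND PROOFS =====

theorem pv_pref_nodup : pvPreferred.Nodup := by decide

-- the key stream both loops read: rows' keys, in order
def pvKs (rows : List (List (String × String))) : List String :=
  rows.flatMap (fun r => r.map Prod.fst)

theorem pv_foldl_rows {σ : Type} (f : σ → String → σ) :
    ∀ (rows : List (List (String × String))) (init : σ),
      rows.foldl (fun a r => r.foldl (fun a2 kv => f a2 kv.1) a) init =
        (pvKs rows).foldl f init := by
  intro rows
  induction rows with
  | nil => intro init; rfl
  | cons r rows ih =>
    intro init
    simp only [pvKs, List.flatMap_cons, List.foldl_append, List.foldl_cons]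
    rw [ih]
    simp [pvKs, List.foldl_map]

theorem pv_allkeys_eq (l : List String) :
    l.foldl (fun acc k => if k ∈ acc then acc else acc ++ [k]) [] = PySem.Set.ofList l := by
  rw [PySem.Set.ofList_eq_foldl]
  exact PySem.List.foldl_congr_mem l _ _ [] (fun acc x _ => (PySem.Set.add_eq_ite acc x).symm)

-- rank lookup: the enumerate-fold dict maps each preferred key to its index, nothing else
theorem pv_idx_append {l : List String} {x : String} (h : x ∉ l) : List.idxOf x (l ++ [x]) = l.length := by
  induction l with
  | nil => simp
  | cons a l ih =>
    simp only [List.mem_cons, not_or] at h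
    rw [List.cons_append, List.idxOf_cons_ne _ (Ne.symm h.1), ih h.2, List.length_cons]

def pvRank (xs : List String) : PySem.Dict String Int :=
  (PySem.List.enumerate xs 0).foldl (fun d p => d.insert p.2 p.1) PySem.Dict.empty

theorem pv_rank_get (xs : List String) (h : xs.Nodup) (k : String) :
    (pvRank xs).get? k = if k ∈ xs then some ((xs.idxOf k : Nat) : Int) else none := by
  induction xs using List.reverseRecOn with
  | nil => simp [pvRank, PySem.List.enumerate_nil, PySem.Dict.get?_empty]
  | append_singleton l x ih =>
    have hnd : l.Nodup := (List.nodup_append.mp h).1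
    have hx : x ∉ l := fun hm => (List.disjoint_of_nodup_append h) hm (List.mem_singleton_self x)
    have hstep : pvRank (l ++ [x]) = (pvRank l).insert x (l.length : Int) := by
      simp [pvRank, PySem.List.enumerate_append, PySem.List.enumerate_cons,
        PySem.List.enumerate_nil, List.foldl_append]
    rw [hstep, PySem.Dict.get?_insert, ih hnd]
    by_cases hkx : k = x
    · subst hkx
      simp [pv_idx_append hx]
    · simp only [if_neg hkx]
      by_cases hkl : k ∈ l
      · simp [hkl, hkx, List.idxOf_append_of_mem hkl]
      · simp [hkl, hkx]

theorem pv_slots_set (l : List String) (k : String) (hk : k ∈ pvPreferred) :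
    (pvPreferred.map (fun p => decide (p ∈ l))).set (pvPreferred.idxOf k) true
      = pvPreferred.map (fun p => decide (p ∈ l ++ [k])) := by
  apply List.ext_getElem
  · simp
  · intro j hj hj'
    simp only [List.length_set, List.length_map] at hj
    have hidx : pvPreferred.idxOf k < pvPreferred.length := List.idxOf_lt_length_of_mem hk
    rw [List.getElem_set, List.getElem_map]
    by_cases hje : pvPreferred.idxOf k = j
    · subst hje
      have : pvPreferred[pvPreferred.idxOf k] = k := List.getElem_idxOf hidx
      simp [this]
    · simp only [if_neg hje, List.getElem_map]
      have hne : pvPreferred[j] ≠ k := by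
        intro he
        apply hje
        have h1 : pvPreferred[pvPreferred.idxOf k] = pvPreferred[j] := by
          rw [List.getElem_idxOf hidx, he]
        exact (List.Nodup.getElem_inj_iff pv_pref_nodup).mp h1
      simp [List.mem_append, hne]

-- B's loop invariant: hit mirrors membership of each preferred key, extras are the
-- non-preferred distinct keys in first-seen order (extra_seen = extras as a Set)
theorem pv_fold_inv (l : List String) :
    l.foldl (fun (st : List Bool × PySem.Set String × List String) k =>
        match ((PySem.List.enumerate pvPreferred 0).foldl (fun d p => d.insert p.2 p.1) PySem.Dict.empty).get? k with
        | some i => (st.1.set i.toNat true, st.2.1, st.2.2)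
        | none =>
          if PySem.Set.contains st.2.1 k then st
          else (st.1, PySem.Set.add st.2.1 k, st.2.2 ++ [k]))
      (List.replicate (PySem.List.len pvPreferred).toNat false,
       (PySem.Set.empty : PySem.Set String), ([] : List String)) =
      (pvPreferred.map (fun p => decide (p ∈ l)),
       PySem.Set.ofList (l.filter (fun y => !decide (y ∈ pvPreferred))),
       PySem.Set.ofList (l.filter (fun y => !decide (y ∈ pvPreferred)))) := by
  induction l using List.reverseRecOn with
  | nil => decide
  | append_singleton l x ih =>
    rw [List.foldl_append, ih, List.foldl_cons, List.foldl_nil]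
    rw [show ((PySem.List.enumerate pvPreferred 0).foldl (fun d p => d.insert p.2 p.1) PySem.Dict.empty) = pvRank pvPreferred from rfl]
    rw [pv_rank_get pvPreferred pv_pref_nodup x]
    by_cases hx : x ∈ pvPreferred
    · rw [if_pos hx]
      have hf : (l ++ [x]).filter (fun y => !decide (y ∈ pvPreferred)) =
          l.filter (fun y => !decide (y ∈ pvPreferred)) := by
        simp [List.filter_append, hx]
      rw [hf]
      dsimp only
      rw [Int.toNat_natCast, pv_slots_set l x hx]
    · rw [if_neg hx]
      have hmapeq : pvPreferred.map (fun p => decide (p ∈ l)) =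
          pvPreferred.map (fun p => decide (p ∈ l ++ [x])) := by
        apply List.map_congr_left
        intro p hp
        have : p ≠ x := fun he => hx (he ▸ hp)
        simp [List.mem_append, this]
      have hf : (l ++ [x]).filter (fun y => !decide (y ∈ pvPreferred)) =
          l.filter (fun y => !decide (y ∈ pvPreferred)) ++ [x] := by
        simp [List.filter_append, hx]
      rw [hf, PySem.Set.ofList_append_singleton]
      dsimp only
      by_cases hmem : x ∈ PySem.Set.ofList (l.filter (fun y => !decide (y ∈ pvPreferred)))
      · have hc : PySem.Set.contains (PySem.Set.ofList (l.filter (fun y => !decide (y ∈ pvPreferred)))) x = true := by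
          simp [PySem.Set.contains_eq_listContains, hmem]
        rw [hc, if_pos rfl, PySem.Set.add_of_mem hmem, hmapeq]
      · have hc : PySem.Set.contains (PySem.Set.ofList (l.filter (fun y => !decide (y ∈ pvPreferred)))) x = false := by
          simp [PySem.Set.contains_eq_listContains, hmem]
        rw [hc]
        simp only [Bool.false_eq_true, if_false]
        rw [PySem.Set.add_of_not_mem hmem, hmapeq]

theorem pv_zip_filter (f : String → Bool) :
    ∀ l : List String, ((l.zip (l.map f)).filter (·.2)).map (·.1) = l.filter f := by
  intro l
  induction l with
  | nil => rfl
  | cons a l ih =>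
    simp only [List.map_cons, List.zip_cons_cons, List.filter_cons]
    cases h : f a
    · simp [ih]
    · simp [ih]

theorem pv_ofList_filter (q : String → Bool) (l : List String) :
    PySem.Set.ofList (l.filter q) = (PySem.Set.ofList l).filter q := by
  induction l using List.reverseRecOn with
  | nil => simp [PySem.Set.ofList_nil]
  | append_singleton l x ih =>
    rw [PySem.Set.ofList_append_singleton]
    by_cases hq : q x = true
    · have : (l ++ [x]).filter q = l.filter q ++ [x] := by simp [List.filter_append, hq]
      rw [this, PySem.Set.ofList_append_singleton, ih]
      by_cases hmem : x ∈ PySem.Set.ofList l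
      · have hm2 : x ∈ (PySem.Set.ofList l).filter q := List.mem_filter.mpr ⟨hmem, hq⟩
        rw [PySem.Set.add_of_mem hmem, PySem.Set.add_of_mem hm2]
      · have hm2 : x ∉ (PySem.Set.ofList l).filter q := fun hm => hmem (List.mem_filter.mp hm).1
        rw [PySem.Set.add_of_not_mem hm2, PySem.Set.add_of_not_mem hmem, List.filter_append]
        simp [hq]
    · have hq' : q x = false := by simpa using hq
      have : (l ++ [x]).filter q = l.filter q := by simp [List.filter_append, hq']
      rw [this, ih]
      by_cases hmem : x ∈ PySem.Set.ofList l
      · rw [PySem.Set.add_of_mem hmem]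
      · rw [PySem.Set.add_of_not_mem hmem, List.filter_append]
        simp [hq']

theorem pv_alt_eq (rows : List (List (String × String))) (h : ¬ rows = []) :
    select_family_portal_access_fields_py_alt rows =
      pvPreferred.filter (fun p => decide (p ∈ pvKs rows)) ++
      PySem.Set.ofList ((pvKs rows).filter (fun y => !decide (y ∈ pvPreferred))) := by
  simp only [select_family_portal_access_fields_py_alt, if_neg h]
  rw [pv_foldl_rows (fun (st : List Bool × PySem.Set String × List String) k =>
        match ((PySem.List.enumerate pvPreferred 0).foldl (fun d p => d.insert p.2 p.1) PySem.Dict.empty).get? k with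
        | some i => (st.1.set i.toNat true, st.2.1, st.2.2)
        | none =>
          if PySem.Set.contains st.2.1 k then st
          else (st.1, PySem.Set.add st.2.1 k, st.2.2 ++ [k])) rows _]
  rw [pv_fold_inv (pvKs rows)]
  rw [pv_zip_filter (fun p => decide (p ∈ pvKs rows)) pvPreferred]

theorem pv_main (rows : List (List (String × String))) :
    select_family_portal_access_fields_py rows = select_family_portal_access_fields_py_alt rows := by
  by_cases hrows : rows = []
  · subst hrows; rfl
  · rw [pv_alt_eq rows hrows]
    simp only [select_family_portal_access_fields_py, if_neg hrows]
    set ks := pvKs rows with hks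
    rw [pv_foldl_rows (fun acc k => if k ∈ acc then acc else acc ++ [k]) rows []]
    rw [pv_allkeys_eq ks]
    set K := PySem.Set.ofList ks with hK
    set O₀ := pvPreferred.filter (fun k => decide (k ∈ K)) with hO0
    have hupd : K.foldl (fun acc k => if k ∈ acc then acc else acc ++ [k]) O₀ =
        PySem.Set.update O₀ K := by
      have : PySem.Set.update O₀ K = K.foldl PySem.Set.add O₀ := rfl
      rw [this]
      exact PySem.List.foldl_congr_mem K _ _ O₀ (fun acc x _ => (PySem.Set.add_eq_ite acc x).symm)
    rw [hupd, PySem.Set.update_eq_append_filter,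
      PySem.Set.ofList_eq_self_of_nodup K (PySem.Set.nodup_ofList ks)]
    have hfe : K.filter (fun y => !PySem.Set.contains O₀ y) =
        K.filter (fun y => !decide (y ∈ pvPreferred)) := by
      apply List.filter_congr
      intro y hy
      have : PySem.Set.contains O₀ y = decide (y ∈ pvPreferred) := by
        by_cases hp : y ∈ pvPreferred
        · have : y ∈ O₀ := by
            rw [hO0, List.mem_filter]; exact ⟨hp, by simpa using hy⟩
          simp [PySem.Set.contains_eq_listContains, this, hp]
        · have : y ∉ O₀ := by
            rw [hO0, List.mem_filter]; rintro ⟨h1, _⟩; exact hp h1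
          simp [PySem.Set.contains_eq_listContains, this, hp]
      rw [this]
    rw [hfe]
    congr 1
    · rw [hO0]
      apply List.filter_congr
      intro p _
      rw [hK]
      simp [PySem.Set.mem_ofList]
    · rw [hK, pv_ofList_filter]

-- ===== VERDICT (by name: the statement is the Claim_ definition above) =====
theorem select_family_portal_access_fields_py_spec : Claim_equal_select_family_portal_access_fields_py := by
  intro rows _
  unfold Spec_select_family_portal_access_fields_py
  exact pv_main rows
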